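-- pv_equiv track=rewrite | github.com/tillroy/AmbienceData | pollution_app_root/pollution_app/spiders/us_gpmn_pollution.py | get_tz
-- ===== SOURCE A (Python) =====
-- def get_tz(name):
--     tz = {
--         (
--             'BIBE-KB', 'LIRI-CH', 'LYJO-HB', 'MACA-HM', 'RUCA-VC', 'VOYA-SB', 'COWP-SM',
--             'INDU-AB'
--         ): 'US/Central',
--         (
--             'CANY-IS', 'CAVE-MA', 'CHIR-ES', 'CIRO-JC', 'COLM-MY', 'CRMO-VC', 'DETO-JR',
--             'DINO-WE',
--             'GLAC-WG', 'GRCA-AS', 'GRTE-SS', 'MEVE-RM', 'PEFO-SE', 'ROMO-LP', 'SCBL-VC',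
--             'YELL-OF',
--             'YELL-WT', 'ZION-DW', 'MEEK-PS', 'RANG-GC', 'WALD-CR', 'BADL-VC', 'CHAM-XX',
--             'SAGU-EA',
--             'THRO-VC', 'WICA-VC', 'YELL-WS'
--         ): 'US/Mountain',
--         (
--             'DEVA-PV', 'GRBA-MY', 'JOTR-BR', 'JOTR-CC', 'JOTR-PW', 'LAVO-ML', 'MOJA-KM',
--             'MORA-TW',
--             'OLYM-DP', 'PINN-ES', 'SEKI-AS', 'SEKI-LK', 'YOSE-SY', 'YOSE-TD', 'MORA-JV',
--             'YOSE-VI'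
--         ): 'US/Pacific',
--         (
--             'CUGA-HS', 'EVER-BC', 'GRSM-CD', 'GRSM-CM', 'GRSM-LR', 'KIMO-BM', 'SHEN-BM',
--             'ACAD-CM',
--             'ACAD-MH', 'CACO-XX', 'COSW-BL', 'EVER-CR', 'GRSM-CC', 'GRSM-PK'
--         ): 'US/Eastern',
--         ('DENA-HQ',): 'US/Alaska',
--         ('HAVO-OB', 'HAVO-VC'): 'US/Hawaii',
--     }
--
--     res = None
--     for el in tz:
--         if name in el:
--             res = tz[el]
--
--     return res
-- ===== SOURCE B (Python) =====
-- _TZ = {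
--     'BIBE-KB': 'US/Central',
--     'LIRI-CH': 'US/Central',
--     'LYJO-HB': 'US/Central',
--     'MACA-HM': 'US/Central',
--     'RUCA-VC': 'US/Central',
--     'VOYA-SB': 'US/Central',
--     'COWP-SM': 'US/Central',
--     'INDU-AB': 'US/Central',
--     'CANY-IS': 'US/Mountain',
--     'CAVE-MA': 'US/Mountain',
--     'CHIR-ES': 'US/Mountain',
--     'CIRO-JC': 'US/Mountain',
--     'COLM-MY': 'US/Mountain',
--     'CRMO-VC': 'US/Mountain',
--     'DETO-JR': 'US/Mountain',
--     'DINO-WE': 'US/Mountain',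
--     'GLAC-WG': 'US/Mountain',
--     'GRCA-AS': 'US/Mountain',
--     'GRTE-SS': 'US/Mountain',
--     'MEVE-RM': 'US/Mountain',
--     'PEFO-SE': 'US/Mountain',
--     'ROMO-LP': 'US/Mountain',
--     'SCBL-VC': 'US/Mountain',
--     'YELL-OF': 'US/Mountain',
--     'YELL-WT': 'US/Mountain',
--     'ZION-DW': 'US/Mountain',
--     'MEEK-PS': 'US/Mountain',
--     'RANG-GC': 'US/Mountain',
--     'WALD-CR': 'US/Mountain',
--     'BADL-VC': 'US/Mountain',
--     'CHAM-XX': 'US/Mountain',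
--     'SAGU-EA': 'US/Mountain',
--     'THRO-VC': 'US/Mountain',
--     'WICA-VC': 'US/Mountain',
--     'YELL-WS': 'US/Mountain',
--     'DEVA-PV': 'US/Pacific',
--     'GRBA-MY': 'US/Pacific',
--     'JOTR-BR': 'US/Pacific',
--     'JOTR-CC': 'US/Pacific',
--     'JOTR-PW': 'US/Pacific',
--     'LAVO-ML': 'US/Pacific',
--     'MOJA-KM': 'US/Pacific',
--     'MORA-TW': 'US/Pacific',
--     'OLYM-DP': 'US/Pacific',
--     'PINN-ES': 'US/Pacific',
--     'SEKI-AS': 'US/Pacific',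
--     'SEKI-LK': 'US/Pacific',
--     'YOSE-SY': 'US/Pacific',
--     'YOSE-TD': 'US/Pacific',
--     'MORA-JV': 'US/Pacific',
--     'YOSE-VI': 'US/Pacific',
--     'CUGA-HS': 'US/Eastern',
--     'EVER-BC': 'US/Eastern',
--     'GRSM-CD': 'US/Eastern',
--     'GRSM-CM': 'US/Eastern',
--     'GRSM-LR': 'US/Eastern',
--     'KIMO-BM': 'US/Eastern',
--     'SHEN-BM': 'US/Eastern',
--     'ACAD-CM': 'US/Eastern',
--     'ACAD-MH': 'US/Eastern',
--     'CACO-XX': 'US/Eastern',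
--     'COSW-BL': 'US/Eastern',
--     'EVER-CR': 'US/Eastern',
--     'GRSM-CC': 'US/Eastern',
--     'GRSM-PK': 'US/Eastern',
--     'DENA-HQ': 'US/Alaska',
--     'HAVO-OB': 'US/Hawaii',
--     'HAVO-VC': 'US/Hawaii',
-- }
--
--
-- def get_tz(name):
--     return _TZ.get(name)
-- ===== Notes on version B (the rewrite author's own statement) =====
-- stated objective: simpler
-- what changed: Replaces A's loop over tuple-keyed groups with an explicit membership scan by a single flat code->timezone dict and one direct .get lookup; the loop disappears entirely.
import Mathlib
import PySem

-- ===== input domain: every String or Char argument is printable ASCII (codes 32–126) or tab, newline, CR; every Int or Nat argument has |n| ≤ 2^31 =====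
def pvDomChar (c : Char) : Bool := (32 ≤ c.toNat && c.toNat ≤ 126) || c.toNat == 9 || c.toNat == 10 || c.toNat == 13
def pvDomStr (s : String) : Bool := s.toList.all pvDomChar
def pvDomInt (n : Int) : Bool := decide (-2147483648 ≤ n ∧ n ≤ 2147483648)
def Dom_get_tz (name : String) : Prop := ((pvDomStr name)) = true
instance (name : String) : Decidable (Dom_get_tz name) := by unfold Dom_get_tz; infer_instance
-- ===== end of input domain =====

-- B replaces A's loop-and-membership-scan over tuple-keyed groups by one flat code→timezone dict lookup (simpler; same results, none for unknown codes).

-- ===== PORT A =====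
-- A's dict with tuple keys as an association list of (group of codes, timezone);
-- the loop keeps the LAST matching group's value ('res = tz[el]' looks up the iterated key el, i.e. yields el's own value).
def tzGroups : List (List String × String) :=
  [ (["BIBE-KB", "LIRI-CH", "LYJO-HB", "MACA-HM", "RUCA-VC", "VOYA-SB", "COWP-SM", "INDU-AB"], "US/Central"),
    (["CANY-IS", "CAVE-MA", "CHIR-ES", "CIRO-JC", "COLM-MY", "CRMO-VC", "DETO-JR", "DINO-WE", "GLAC-WG", "GRCA-AS", "GRTE-SS", "MEVE-RM", "PEFO-SE", "ROMO-LP", "SCBL-VC", "YELL-OF", "YELL-WT", "ZION-DW", "MEEK-PS", "RANG-GC", "WALD-CR", "BADL-VC", "CHAM-XX", "SAGU-EA", "THRO-VC", "WICA-VC", "YELL-WS"], "US/Mountain"),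
    (["DEVA-PV", "GRBA-MY", "JOTR-BR", "JOTR-CC", "JOTR-PW", "LAVO-ML", "MOJA-KM", "MORA-TW", "OLYM-DP", "PINN-ES", "SEKI-AS", "SEKI-LK", "YOSE-SY", "YOSE-TD", "MORA-JV", "YOSE-VI"], "US/Pacific"),
    (["CUGA-HS", "EVER-BC", "GRSM-CD", "GRSM-CM", "GRSM-LR", "KIMO-BM", "SHEN-BM", "ACAD-CM", "ACAD-MH", "CACO-XX", "COSW-BL", "EVER-CR", "GRSM-CC", "GRSM-PK"], "US/Eastern"),
    (["DENA-HQ"], "US/Alaska"),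
    (["HAVO-OB", "HAVO-VC"], "US/Hawaii") ]

def get_tz (name : String) : Option String :=
  tzGroups.foldl (fun res el => if name ∈ el.1 then some el.2 else res) none

-- ===== PORT B =====
-- flat dict literal in Source B's insertion order (keys pairwise distinct, so the items list IS the dict); dict.get = first-match lookup
def tzFlat : PySem.Dict String String :=
  PySem.Dict.mk [ ("BIBE-KB", "US/Central"),
    ("LIRI-CH", "US/Central"),
    ("LYJO-HB", "US/Central"),
    ("MACA-HM", "US/Central"),
    ("RUCA-VC", "US/Central"),
    ("VOYA-SB", "US/Central"),
    ("COWP-SM", "US/Central"),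
    ("INDU-AB", "US/Central"),
    ("CANY-IS", "US/Mountain"),
    ("CAVE-MA", "US/Mountain"),
    ("CHIR-ES", "US/Mountain"),
    ("CIRO-JC", "US/Mountain"),
    ("COLM-MY", "US/Mountain"),
    ("CRMO-VC", "US/Mountain"),
    ("DETO-JR", "US/Mountain"),
    ("DINO-WE", "US/Mountain"),
    ("GLAC-WG", "US/Mountain"),
    ("GRCA-AS", "US/Mountain"),
    ("GRTE-SS", "US/Mountain"),
    ("MEVE-RM", "US/Mountain"),
    ("PEFO-SE", "US/Mountain"),
    ("ROMO-LP", "US/Mountain"),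
    ("SCBL-VC", "US/Mountain"),
    ("YELL-OF", "US/Mountain"),
    ("YELL-WT", "US/Mountain"),
    ("ZION-DW", "US/Mountain"),
    ("MEEK-PS", "US/Mountain"),
    ("RANG-GC", "US/Mountain"),
    ("WALD-CR", "US/Mountain"),
    ("BADL-VC", "US/Mountain"),
    ("CHAM-XX", "US/Mountain"),
    ("SAGU-EA", "US/Mountain"),
    ("THRO-VC", "US/Mountain"),
    ("WICA-VC", "US/Mountain"),
    ("YELL-WS", "US/Mountain"),
    ("DEVA-PV", "US/Pacific"),
    ("GRBA-MY", "US/Pacific"),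
    ("JOTR-BR", "US/Pacific"),
    ("JOTR-CC", "US/Pacific"),
    ("JOTR-PW", "US/Pacific"),
    ("LAVO-ML", "US/Pacific"),
    ("MOJA-KM", "US/Pacific"),
    ("MORA-TW", "US/Pacific"),
    ("OLYM-DP", "US/Pacific"),
    ("PINN-ES", "US/Pacific"),
    ("SEKI-AS", "US/Pacific"),
    ("SEKI-LK", "US/Pacific"),
    ("YOSE-SY", "US/Pacific"),
    ("YOSE-TD", "US/Pacific"),
    ("MORA-JV", "US/Pacific"),
    ("YOSE-VI", "US/Pacific"),
    ("CUGA-HS", "US/Eastern"),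
    ("EVER-BC", "US/Eastern"),
    ("GRSM-CD", "US/Eastern"),
    ("GRSM-CM", "US/Eastern"),
    ("GRSM-LR", "US/Eastern"),
    ("KIMO-BM", "US/Eastern"),
    ("SHEN-BM", "US/Eastern"),
    ("ACAD-CM", "US/Eastern"),
    ("ACAD-MH", "US/Eastern"),
    ("CACO-XX", "US/Eastern"),
    ("COSW-BL", "US/Eastern"),
    ("EVER-CR", "US/Eastern"),
    ("GRSM-CC", "US/Eastern"),
    ("GRSM-PK", "US/Eastern"),
    ("DENA-HQ", "US/Alaska"),
    ("HAVO-OB", "US/Hawaii"),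
    ("HAVO-VC", "US/Hawaii") ]

def get_tz_alt (name : String) : Option String :=
  tzFlat.get? name

-- ===== PRECONDITION & SPEC =====
def Spec_get_tz (name : String) (out : Option String) : Prop := out = get_tz_alt name
instance (name : String) (out : Option String) : Decidable (Spec_get_tz name out) := by unfold Spec_get_tz; infer_instance

-- ===== CLAIM (what is proved, stated in full; the proofs are below) =====
def Claim_equal_get_tz : Prop := ∀ (name : String), Dom_get_tz name → Spec_get_tz name (get_tz name)

-- ===== LEMMAS AND PROOFS =====

-- ===== VERDICT (by name: the statement is the Claim_ definition above) =====
set_option maxRecDepth 8000 in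
set_option maxHeartbeats 2000000 in
theorem get_tz_spec : Claim_equal_get_tz := by
  intro name _
  unfold Spec_get_tz
  by_cases h0 : name = "BIBE-KB"
  · subst h0; decide
  by_cases h1 : name = "LIRI-CH"
  · subst h1; decide
  by_cases h2 : name = "LYJO-HB"
  · subst h2; decide
  by_cases h3 : name = "MACA-HM"
  · subst h3; decide
  by_cases h4 : name = "RUCA-VC"
  · subst h4; decide
  by_cases h5 : name = "VOYA-SB"
  · subst h5; decide
  by_cases h6 : name = "COWP-SM"
  · subst h6; decide
  by_cases h7 : name = "INDU-AB"
  · subst h7; decide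
  by_cases h8 : name = "CANY-IS"
  · subst h8; decide
  by_cases h9 : name = "CAVE-MA"
  · subst h9; decide
  by_cases h10 : name = "CHIR-ES"
  · subst h10; decide
  by_cases h11 : name = "CIRO-JC"
  · subst h11; decide
  by_cases h12 : name = "COLM-MY"
  · subst h12; decide
  by_cases h13 : name = "CRMO-VC"
  · subst h13; decide
  by_cases h14 : name = "DETO-JR"
  · subst h14; decide
  by_cases h15 : name = "DINO-WE"
  · subst h15; decide
  by_cases h16 : name = "GLAC-WG"
  · subst h16; decide
  by_cases h17 : name = "GRCA-AS"
  · subst h17; decide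
  by_cases h18 : name = "GRTE-SS"
  · subst h18; decide
  by_cases h19 : name = "MEVE-RM"
  · subst h19; decide
  by_cases h20 : name = "PEFO-SE"
  · subst h20; decide
  by_cases h21 : name = "ROMO-LP"
  · subst h21; decide
  by_cases h22 : name = "SCBL-VC"
  · subst h22; decide
  by_cases h23 : name = "YELL-OF"
  · subst h23; decide
  by_cases h24 : name = "YELL-WT"
  · subst h24; decide
  by_cases h25 : name = "ZION-DW"
  · subst h25; decide
  by_cases h26 : name = "MEEK-PS"
  · subst h26; decide
  by_cases h27 : name = "RANG-GC"
  · subst h27; decide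
  by_cases h28 : name = "WALD-CR"
  · subst h28; decide
  by_cases h29 : name = "BADL-VC"
  · subst h29; decide
  by_cases h30 : name = "CHAM-XX"
  · subst h30; decide
  by_cases h31 : name = "SAGU-EA"
  · subst h31; decide
  by_cases h32 : name = "THRO-VC"
  · subst h32; decide
  by_cases h33 : name = "WICA-VC"
  · subst h33; decide
  by_cases h34 : name = "YELL-WS"
  · subst h34; decide
  by_cases h35 : name = "DEVA-PV"
  · subst h35; decide
  by_cases h36 : name = "GRBA-MY"
  · subst h36; decide
  by_cases h37 : name = "JOTR-BR"
  · subst h37; decide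
  by_cases h38 : name = "JOTR-CC"
  · subst h38; decide
  by_cases h39 : name = "JOTR-PW"
  · subst h39; decide
  by_cases h40 : name = "LAVO-ML"
  · subst h40; decide
  by_cases h41 : name = "MOJA-KM"
  · subst h41; decide
  by_cases h42 : name = "MORA-TW"
  · subst h42; decide
  by_cases h43 : name = "OLYM-DP"
  · subst h43; decide
  by_cases h44 : name = "PINN-ES"
  · subst h44; decide
  by_cases h45 : name = "SEKI-AS"
  · subst h45; decide
  by_cases h46 : name = "SEKI-LK"
  · subst h46; decide
  by_cases h47 : name = "YOSE-SY"
  · subst h47; decide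
  by_cases h48 : name = "YOSE-TD"
  · subst h48; decide
  by_cases h49 : name = "MORA-JV"
  · subst h49; decide
  by_cases h50 : name = "YOSE-VI"
  · subst h50; decide
  by_cases h51 : name = "CUGA-HS"
  · subst h51; decide
  by_cases h52 : name = "EVER-BC"
  · subst h52; decide
  by_cases h53 : name = "GRSM-CD"
  · subst h53; decide
  by_cases h54 : name = "GRSM-CM"
  · subst h54; decide
  by_cases h55 : name = "GRSM-LR"
  · subst h55; decide
  by_cases h56 : name = "KIMO-BM"
  · subst h56; decide
  by_cases h57 : name = "SHEN-BM"
  · subst h57; decide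
  by_cases h58 : name = "ACAD-CM"
  · subst h58; decide
  by_cases h59 : name = "ACAD-MH"
  · subst h59; decide
  by_cases h60 : name = "CACO-XX"
  · subst h60; decide
  by_cases h61 : name = "COSW-BL"
  · subst h61; decide
  by_cases h62 : name = "EVER-CR"
  · subst h62; decide
  by_cases h63 : name = "GRSM-CC"
  · subst h63; decide
  by_cases h64 : name = "GRSM-PK"
  · subst h64; decide
  by_cases h65 : name = "DENA-HQ"
  · subst h65; decide
  by_cases h66 : name = "HAVO-OB"
  · subst h66; decide
  by_cases h67 : name = "HAVO-VC"
  · subst h67; decide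
  -- name is none of the 68 codes: both sides compute to none
  have hb : get_tz_alt name = none := by
    rw [get_tz_alt, PySem.Dict.get?_eq_none_iff_not_mem_keys]
    simp [tzFlat, h0, h1, h2, h3, h4, h5, h6, h7, h8, h9, h10, h11, h12, h13, h14, h15, h16, h17, h18, h19, h20, h21, h22, h23, h24, h25, h26, h27, h28, h29, h30, h31, h32, h33, h34, h35, h36, h37, h38, h39, h40, h41, h42, h43, h44, h45, h46, h47, h48, h49, h50, h51, h52, h53, h54, h55, h56, h57, h58, h59, h60, h61, h62, h63, h64, h65, h66, h67]
  rw [hb]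
  simp [get_tz, tzGroups, h0, h1, h2, h3, h4, h5, h6, h7, h8, h9, h10, h11, h12, h13, h14, h15, h16, h17, h18, h19, h20, h21, h22, h23, h24, h25, h26, h27, h28, h29, h30, h31, h32, h33, h34, h35, h36, h37, h38, h39, h40, h41, h42, h43, h44, h45, h46, h47, h48, h49, h50, h51, h52, h53, h54, h55, h56, h57, h58, h59, h60, h61, h62, h63, h64, h65, h66, h67]
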